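-- pv_equiv track=rewrite | github.com/Zekai-Zhao775/LeetCode | Juejin/13. 构造特定数组的逆序拼接.py | solution
-- ===== SOURCE A (Python) =====
-- def solution(n: int) -> list:
--     # PLEASE DO NOT MODIFY THE FUNCTION SIGNATURE
--     # write code here
--     result = []
--     i = n
--     j = 0
--
--     while i >= 0:
--         j = 0
--         while j < i:
--             result.append(n - j)
--             j += 1
--         i -= 1
--     return result
-- ===== SOURCE B (Python) =====
-- def solution(n: int) -> list:
--     # Precompute the descending base array once; each output block of
--     # length i is exactly its prefix desc[:i].
--     desc = list(range(n, 0, -1))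
--     result = []
--     for i in range(n, 0, -1):
--         result += desc[:i]
--     return result
-- ===== Notes on version B (the rewrite author's own statement) =====
-- stated objective: alternative
-- what changed: Replaces A's nested per-element append loops with a precomputed descending table whose prefixes desc[:i] are concatenated for i = n..1 via bulk list extension.
import Mathlib
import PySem

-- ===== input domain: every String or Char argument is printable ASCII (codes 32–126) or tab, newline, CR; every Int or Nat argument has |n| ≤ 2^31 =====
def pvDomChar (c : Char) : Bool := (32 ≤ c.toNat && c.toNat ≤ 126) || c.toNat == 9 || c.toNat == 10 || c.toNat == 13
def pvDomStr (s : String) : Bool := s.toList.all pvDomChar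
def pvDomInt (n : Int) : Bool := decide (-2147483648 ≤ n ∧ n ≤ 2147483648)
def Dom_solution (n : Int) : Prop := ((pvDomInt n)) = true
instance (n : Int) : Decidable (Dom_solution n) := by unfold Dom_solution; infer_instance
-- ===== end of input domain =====

-- B replaces A's nested per-element append loops by a precomputed descending
-- table whose prefixes are concatenated (alternative decomposition, same cost).

-- ===== PORT A =====
-- inner 'while j < i: result.append(n - j); j += 1'
def solutionInner (n i j : Int) (result : List Int) : List Int :=
  if j < i then solutionInner n i (j + 1) (result ++ [n - j]) else result
  termination_by (i - j).toNat
  decreasing_by omega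

-- outer 'while i >= 0: <inner>; i -= 1'
def solutionOuter (n i : Int) (result : List Int) : List Int :=
  if 0 ≤ i then solutionOuter n (i - 1) (solutionInner n i 0 result) else result
  termination_by (i + 1).toNat
  decreasing_by omega

def solution (n : Int) : List Int := solutionOuter n n []

-- ===== PORT B =====
def solution_alt (n : Int) : List Int :=
  let desc := PySem.List.pyRange n 0 (-1)
  (PySem.List.pyRange n 0 (-1)).foldl
    (fun result i => result ++ PySem.List.slice desc none (some i)) []

-- ===== PRECONDITION & SPEC =====
def Spec_solution (n : Int) (out : List Int) : Prop := out = solution_alt n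
instance (n : Int) (out : List Int) : Decidable (Spec_solution n out) := by unfold Spec_solution; infer_instance

-- ===== CLAIM (what is proved, stated in full; the proofs are below) =====
def Claim_equal_solution : Prop := ∀ (n : Int), Dom_solution n → Spec_solution n (solution n)

-- ===== LEMMAS AND PROOFS =====

-- one output block: [n, n-1, ..., n-i+1]
def pvBlock (n i : Int) : List Int := (List.range i.toNat).map (fun k => n - (Int.ofNat k))

theorem solutionInner_eq (n i j : Int) (result : List Int) :
    solutionInner n i j result = result ++ ((PySem.List.pyRange j i 1).map (fun k => n - k)) := by
  unfold solutionInner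
  split
  · rename_i h
    rw [solutionInner_eq n i (j + 1)]
    rw [PySem.List.pyRange_one_cons h]
    simp
  · rename_i h
    rw [PySem.List.pyRange_one_eq_nil (by omega)]
    simp
  termination_by (i - j).toNat
  decreasing_by omega

theorem block_eq (n i : Int) :
    (PySem.List.pyRange 0 i 1).map (fun k => n - k) = pvBlock n i := by
  rw [PySem.List.pyRange_one]
  unfold pvBlock
  simp only [Int.sub_zero, List.map_map]
  apply List.map_congr_left
  intro a _
  simp

theorem solutionOuter_eq (n i : Int) (result : List Int) :
    solutionOuter n i result =
      (PySem.List.pyRange i 0 (-1)).foldl (fun r j => r ++ pvBlock n j) result := by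
  unfold solutionOuter
  split
  · rename_i h
    rw [solutionOuter_eq n (i - 1), solutionInner_eq, block_eq]
    by_cases hi : 0 < i
    · rw [PySem.List.pyRange_neg_one_cons hi]
      simp
    · have hi0 : i = 0 := by omega
      subst hi0
      rw [PySem.List.pyRange_neg_one_eq_nil (by omega)]
      simp [pvBlock]
  · rename_i h
    rw [PySem.List.pyRange_neg_one_eq_nil (by omega)]
    simp
  termination_by (i + 1).toNat
  decreasing_by omega

theorem slice_desc (n i : Int) (h0 : 0 < i) (hn : i ≤ n) :
    PySem.List.slice (PySem.List.pyRange n 0 (-1)) none (some i) = pvBlock n i := by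
  rw [PySem.List.slice_to _ (by omega : (0:Int) ≤ i)]
  rw [PySem.List.pyRange_neg_one]
  rw [← List.map_take, List.take_range]
  have hmin : min i.toNat (n - 0).toNat = i.toNat := by omega
  rw [hmin]
  unfold pvBlock
  apply List.map_congr_left
  intro a _
  simp

-- ===== VERDICT (by name: the statement is the Claim_ definition above) =====
theorem solution_spec : Claim_equal_solution := by
  intro n _
  unfold Spec_solution solution solution_alt
  rw [solutionOuter_eq]
  have h : ∀ j ∈ PySem.List.pyRange n 0 (-1), ∀ r : List Int,
      r ++ pvBlock n j = r ++ PySem.List.slice (PySem.List.pyRange n 0 (-1)) none (some j) := by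
    intro j hj r
    have hh := (PySem.List.mem_pyRange_neg_one).mp hj
    rw [slice_desc n j hh.1 hh.2]
  exact PySem.List.foldl_congr_mem' _ _ _ _ h
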